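-- pv_equiv track=rewrite | github.com/NVIDIA/skyhook-packages | scripts/format_license.py | find_existing_license
-- ===== SOURCE A (Python) =====
-- from typing import List, Tuple
--
-- def find_existing_license(content: str) -> Tuple[int, int]:
--     """
--     Find the start and end positions of an existing license header in file content.
--
--     Args:
--         content: The full content of the file as a string
--
--     Returns:
--         Tuple of (start_line, end_line) where:
--         - start_line: Line number where license starts (0-based), -1 if not found
--         - end_line: Line number after license ends (0-based), -1 if not found
--
--     This function detects SPDX license headers and standard Apache 2.0 license blocks.
--     """
--     lines = content.split('\n')
--     start_line = -1
--     end_line = -1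
--     in_license_block = False
--
--     # Scan through each line looking for license markers
--     for i, line in enumerate(lines):
--         stripped_line = line.strip()
--
--         # Skip shebang lines (#!/usr/bin/env python3, #!/bin/bash, etc.)
--         # These should be preserved at the beginning of files
--         if stripped_line.startswith('#!/'):
--             continue
--
--         # Look for the start of a license block
--         if not in_license_block:
--             # Check for SPDX headers or copyright notices
--             if ('SPDX-FileCopyrightText' in stripped_line or
--                 'SPDX-License-Identifier' in stripped_line or
--                 'Copyright (c) NVIDIA CORPORATION' in stripped_line or
--                 # Go files with block comment starting license
--                 (stripped_line == '/*' and i + 1 < len(lines) and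
--                  ('SPDX-FileCopyrightText' in lines[i + 1] or
--                   'SPDX-License-Identifier' in lines[i + 1] or
--                   'Copyright (c) NVIDIA CORPORATION' in lines[i + 1]))):
--                 start_line = i
--                 in_license_block = True
--
--         # Look for the end of a license block
--         if in_license_block and 'limitations under the License' in stripped_line:
--             end_line = i + 1
--
--             # Include any trailing empty comment lines
--             for j in range(i + 1, len(lines)):
--                 next_line = lines[j].strip()
--                 if (next_line == '' or  # Empty lines
--                     next_line.startswith('#') and next_line.replace('#', '').strip() == '' or
--                     next_line == '# ' or
--                     next_line == '*/' or  # Go comment block endings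
--                     next_line.startswith('*') and next_line.replace('*', '').strip() == ''):
--                     end_line = j + 1
--                 else:
--                     # Stop when we hit actual code/content
--                     break
--             break  # Found the end, stop scanning
--
--     return start_line, end_line
-- ===== SOURCE B (Python) =====
-- _MARKS = ('SPDX-FileCopyrightText', 'SPDX-License-Identifier',
--           'Copyright (c) NVIDIA CORPORATION')
--
--
-- def find_existing_license(content):
--     # Classify every line once into boolean tag vectors, then compute the
--     # answer purely by index selection over the tags (no scanning state).
--     lines = content.split('\n')
--     n = len(lines)
--     stripped = [line.strip() for line in lines]
--     shebang = [s.startswith('#!/') for s in stripped]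
--     is_start = [not shebang[i] and
--                 (any(m in stripped[i] for m in _MARKS) or
--                  (stripped[i] == '/*' and i + 1 < n and
--                   any(m in lines[i + 1] for m in _MARKS)))
--                 for i in range(n)]
--     is_end = [not shebang[i] and 'limitations under the License' in stripped[i]
--               for i in range(n)]
--     is_real = [not (s == '' or
--                     (s.startswith('#') and s.replace('#', '').strip() == '') or
--                     s == '# ' or s == '*/' or
--                     (s.startswith('*') and s.replace('*', '').strip() == ''))
--                for s in stripped]
--
--     start = next((i for i in range(n) if is_start[i]), -1)
--     if start == -1:
--         return -1, -1
--     em = next((j for j in range(start, n) if is_end[j]), -1)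
--     if em == -1:
--         return start, -1
--     end = next((k for k in range(em + 1, n) if is_real[k]), n)
--     return start, end
-- ===== Notes on version B (the rewrite author's own statement) =====
-- stated objective: alternative
-- what changed: A's single stateful scan (in_license_block flag, nested trailer loop, break) is replaced by a tag-then-select algorithm: one classification pass builds boolean vectors (shebang / start / end-marker / real-content) per line, and the result is computed by three independent first-index selections over those vectors with no scanning state at all.
import Mathlib
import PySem

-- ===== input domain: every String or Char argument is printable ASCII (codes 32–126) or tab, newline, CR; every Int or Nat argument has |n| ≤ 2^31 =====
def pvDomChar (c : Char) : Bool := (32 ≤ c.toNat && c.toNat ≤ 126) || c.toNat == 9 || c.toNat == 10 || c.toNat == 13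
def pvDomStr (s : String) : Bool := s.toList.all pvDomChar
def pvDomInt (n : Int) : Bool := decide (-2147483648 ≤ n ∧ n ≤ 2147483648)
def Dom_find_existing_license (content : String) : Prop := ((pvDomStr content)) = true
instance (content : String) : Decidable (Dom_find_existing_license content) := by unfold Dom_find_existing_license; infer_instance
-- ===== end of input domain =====

-- B replaces A's single stateful scan (in_license_block flag, nested trailer loop, break) by a
-- tag-then-select algorithm: boolean tag vectors built once, then three first-index selections
-- (objective: alternative; same asymptotic cost).

-- ===== PORT A =====
-- A's start-of-license condition, on the stripped line s = lines[i].strip() (lookahead at lines[i+1] is raw, as in A)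
def pvStartA (lines : List String) (i : Nat) (s : String) : Bool :=
  PySem.Str.isIn "SPDX-FileCopyrightText" s ||
  PySem.Str.isIn "SPDX-License-Identifier" s ||
  PySem.Str.isIn "Copyright (c) NVIDIA CORPORATION" s ||
  (s == "/*" && decide (i + 1 < lines.length) &&
    (PySem.Str.isIn "SPDX-FileCopyrightText" (lines.getD (i+1) "") ||
     PySem.Str.isIn "SPDX-License-Identifier" (lines.getD (i+1) "") ||
     PySem.Str.isIn "Copyright (c) NVIDIA CORPORATION" (lines.getD (i+1) "")))

-- A's trailing-line condition (the big or-condition in A's inner j-loop), on the stripped line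
def pvTrailerA (t : String) : Bool :=
  t == "" ||
  (PySem.Str.startswith t "#" && PySem.Str.strip (PySem.Str.replace t "#" "") == "") ||
  t == "# " || t == "*/" ||
  (PySem.Str.startswith t "*" && PySem.Str.strip (PySem.Str.replace t "*" "") == "")

-- A's inner 'for j in range(i+1, len(lines))' extension loop (endL = current end_line)
def pvExtA (lines : List String) (j : Nat) (endL : Int) : Int :=
  if j < lines.length then
    if pvTrailerA (PySem.Str.strip (lines.getD j "")) then pvExtA lines (j+1) ((j : Int) + 1)
    else endL
  else endL
termination_by lines.length - j

-- A's main 'for i, line in enumerate(lines)' loop; the in-place state update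
-- (start_line = i; in_license_block = True) is inlined into the two branches of the start check,
-- so the same-iteration end check runs with the updated state exactly as in A
def pvLoopA (lines : List String) (i : Nat) (inLic : Bool) (startL endL : Int) : Int × Int :=
  if i < lines.length then
    if PySem.Str.startswith (PySem.Str.strip (lines.getD i "")) "#!/" then
      pvLoopA lines (i+1) inLic startL endL
    else
      if !inLic && pvStartA lines i (PySem.Str.strip (lines.getD i "")) then
        if PySem.Str.isIn "limitations under the License" (PySem.Str.strip (lines.getD i "")) then
          ((i : Int), pvExtA lines (i+1) ((i : Int) + 1))
        else pvLoopA lines (i+1) true ((i : Int)) endL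
      else
        if inLic && PySem.Str.isIn "limitations under the License" (PySem.Str.strip (lines.getD i "")) then
          (startL, pvExtA lines (i+1) ((i : Int) + 1))
        else pvLoopA lines (i+1) inLic startL endL
  else (startL, endL)
termination_by lines.length - i

def find_existing_license (content : String) : Int × Int :=
  pvLoopA ((PySem.Str.split? content "\n").getD []) 0 false (-1) (-1)

-- ===== PORT B =====
-- any(m in s for m in _MARKS)
def pvAnyMark (s : String) : Bool :=
  (["SPDX-FileCopyrightText", "SPDX-License-Identifier",
    "Copyright (c) NVIDIA CORPORATION"]).any (fun m => PySem.Str.isIn m s)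

-- tag vectors built by comprehensions, then three next(...)-style first-index selections
def find_existing_license_alt (content : String) : Int × Int :=
  let lines := (PySem.Str.split? content "\n").getD []
  let n := lines.length
  let stripped := lines.map PySem.Str.strip
  let shebang := stripped.map (fun s => PySem.Str.startswith s "#!/")
  let isStart := (List.range n).map (fun i =>
    !(shebang.getD i false) &&
      (pvAnyMark (stripped.getD i "") ||
        (stripped.getD i "" == "/*" && decide (i + 1 < n) && pvAnyMark (lines.getD (i+1) ""))))
  let isEnd := (List.range n).map (fun i =>
    !(shebang.getD i false) &&
      PySem.Str.isIn "limitations under the License" (stripped.getD i ""))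
  let isReal := stripped.map (fun s =>
    !(s == "" ||
      (PySem.Str.startswith s "#" && PySem.Str.strip (PySem.Str.replace s "#" "") == "") ||
      s == "# " || s == "*/" ||
      (PySem.Str.startswith s "*" && PySem.Str.strip (PySem.Str.replace s "*" "") == "")))
  match (List.range n).find? (fun i => isStart.getD i false) with
  | none => (-1, -1)
  | some st =>
    match (List.range' st (n - st)).find? (fun j => isEnd.getD j false) with
    | none => ((st : Int), -1)
    | some em =>
      let e := ((List.range' (em + 1) (n - (em + 1))).find? (fun k => isReal.getD k false)).getD n
      ((st : Int), (e : Int))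

-- ===== PRECONDITION & SPEC =====
def Spec_find_existing_license (content : String) (out : Int × Int) : Prop := out = find_existing_license_alt content
instance (content : String) (out : Int × Int) : Decidable (Spec_find_existing_license content out) := by unfold Spec_find_existing_license; infer_instance

-- ===== CLAIM (what is proved, stated in full; the proofs are below) =====
def Claim_equal_find_existing_license : Prop := ∀ (content : String), Dom_find_existing_license content → Spec_find_existing_license content (find_existing_license content)

-- ===== LEMMAS AND PROOFS =====

-- proof-side abbreviations for the per-line predicates
def pSheb (lines : List String) (j : Nat) : Bool :=
  PySem.Str.startswith (PySem.Str.strip (lines.getD j "")) "#!/"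
def pS (lines : List String) (j : Nat) : Bool :=
  !pSheb lines j && pvStartA lines j (PySem.Str.strip (lines.getD j ""))
def pE (lines : List String) (j : Nat) : Bool :=
  !pSheb lines j && PySem.Str.isIn "limitations under the License" (PySem.Str.strip (lines.getD j ""))
def pR (lines : List String) (j : Nat) : Bool :=
  !pvTrailerA (PySem.Str.strip (lines.getD j ""))

-- intermediate forms of A's loop: phase 1 (find start), phase 2 (find end + extend)
def pvPhase1 (lines : List String) (i : Nat) : Int :=
  if i < lines.length then
    if pSheb lines i then pvPhase1 lines (i+1)
    else if pvStartA lines i (PySem.Str.strip (lines.getD i "")) then (i : Int)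
    else pvPhase1 lines (i+1)
  else -1
termination_by lines.length - i

def pvPhase2 (lines : List String) (j : Nat) : Int :=
  if j < lines.length then
    if pSheb lines j then pvPhase2 lines (j+1)
    else if PySem.Str.isIn "limitations under the License" (PySem.Str.strip (lines.getD j "")) then
      pvExtA lines (j+1) ((j : Int) + 1)
    else pvPhase2 lines (j+1)
  else -1
termination_by lines.length - j

-- once A's flag is set with recorded start startL, the rest of A's scan is phase 2
theorem pvLoopA_true (lines : List String) (i : Nat) (startL : Int) :
    pvLoopA lines i true startL (-1) = (startL, pvPhase2 lines i) := by
  rw [pvLoopA, pvPhase2]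
  by_cases h : i < lines.length
  · rw [if_pos h, if_pos h]
    by_cases hsh : PySem.Str.startswith (PySem.Str.strip (lines.getD i "")) "#!/" = true
    · rw [if_pos hsh, if_pos (show pSheb lines i = true from hsh)]
      exact pvLoopA_true lines (i+1) startL
    · rw [if_neg hsh, if_neg (show ¬ pSheb lines i = true from hsh)]
      simp only [Bool.not_true, Bool.false_and, Bool.false_eq_true, if_false, Bool.true_and]
      by_cases hm : PySem.Str.isIn "limitations under the License" (PySem.Str.strip (lines.getD i "")) = true
      · rw [if_pos hm, if_pos hm]
      · rw [if_neg hm, if_neg hm]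
        exact pvLoopA_true lines (i+1) startL
  · rw [if_neg h, if_neg h]
termination_by lines.length - i

-- before the flag is set, A's scan from i computes the two phases from i
theorem pvLoopA_false (lines : List String) (i : Nat) :
    pvLoopA lines i false (-1) (-1) =
      (if pvPhase1 lines i = -1 then ((-1 : Int), (-1 : Int))
       else (pvPhase1 lines i, pvPhase2 lines (pvPhase1 lines i).toNat)) := by
  rw [pvLoopA]
  by_cases h : i < lines.length
  · rw [if_pos h]
    by_cases hsh : PySem.Str.startswith (PySem.Str.strip (lines.getD i "")) "#!/" = true
    · rw [if_pos hsh]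
      have h1 : pvPhase1 lines i = pvPhase1 lines (i+1) := by
        rw [pvPhase1, if_pos h, if_pos (show pSheb lines i = true from hsh)]
      rw [h1]
      exact pvLoopA_false lines (i+1)
    · rw [if_neg hsh]
      simp only [Bool.not_false, Bool.true_and, Bool.false_and, Bool.false_eq_true, if_false]
      by_cases hst : pvStartA lines i (PySem.Str.strip (lines.getD i "")) = true
      · rw [if_pos hst]
        have h1 : pvPhase1 lines i = (i : Int) := by
          rw [pvPhase1, if_pos h, if_neg (show ¬ pSheb lines i = true from hsh), if_pos hst]
        have hne : ¬ ((i : Int) = -1) := by omega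
        rw [h1, if_neg hne, Int.toNat_natCast]
        conv_rhs => rw [pvPhase2]
        rw [if_pos h, if_neg (show ¬ pSheb lines i = true from hsh)]
        by_cases hm : PySem.Str.isIn "limitations under the License" (PySem.Str.strip (lines.getD i "")) = true
        · rw [if_pos hm, if_pos hm]
        · rw [if_neg hm, if_neg hm]
          exact pvLoopA_true lines (i+1) ((i : Int))
      · rw [if_neg hst]
        have h1 : pvPhase1 lines i = pvPhase1 lines (i+1) := by
          rw [pvPhase1, if_pos h, if_neg (show ¬ pSheb lines i = true from hsh), if_neg hst]
        rw [h1]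
        exact pvLoopA_false lines (i+1)
  · rw [if_neg h]
    have h1 : pvPhase1 lines i = -1 := by rw [pvPhase1, if_neg h]
    rw [h1, if_pos rfl]
termination_by lines.length - i

-- find? over a range tail, one step
theorem find?_range'_step (p : Nat → Bool) (i n : Nat) :
    (List.range' i (n - i)).find? p =
      if i < n then (if p i then some i else (List.range' (i+1) (n - (i+1))).find? p)
      else none := by
  by_cases h : i < n
  · rw [if_pos h]
    have : n - i = (n - (i+1)) + 1 := by omega
    rw [this, List.range'_succ]
    by_cases hp : p i = true
    · rw [if_pos hp, List.find?_cons_of_pos hp]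
    · rw [if_neg hp, List.find?_cons_of_neg hp]
  · rw [if_neg h]
    have : n - i = 0 := by omega
    rw [this]; rfl

theorem find?_congr_mem {α : Type} {p q : α → Bool} (l : List α)
    (h : ∀ a ∈ l, p a = q a) : l.find? p = l.find? q := by
  induction l with
  | nil => rfl
  | cons a t ih =>
    by_cases hq : q a = true
    · rw [List.find?_cons_of_pos hq, List.find?_cons_of_pos (by rw [h a (by simp)]; exact hq)]
    · rw [List.find?_cons_of_neg hq, List.find?_cons_of_neg (by rw [h a (by simp)]; exact hq)]
      exact ih (fun b hb => h b (by simp [hb]))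

-- the extension loop computes the first non-trailer index (or n)
theorem pvExtA_char (lines : List String) (k : Nat) (hk : k ≤ lines.length) :
    pvExtA lines k ((k : Int)) =
      (((((List.range' k (lines.length - k)).find? (fun j => pR lines j)).getD lines.length) : Nat) : Int) := by
  rw [pvExtA, find?_range'_step]
  by_cases h : k < lines.length
  · rw [if_pos h, if_pos h]
    by_cases ht : pvTrailerA (PySem.Str.strip (lines.getD k "")) = true
    · have hpr : pR lines k = false := by simp only [pR, ht, Bool.not_true]
      rw [if_pos ht, hpr]
      simp only [Bool.false_eq_true, if_false]
      have := pvExtA_char lines (k+1) (by omega)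
      rw [show ((k : Int) + 1) = (((k+1 : Nat)) : Int) by push_cast; ring, this]
    · have hpr : pR lines k = true := by
        simp only [pR, Bool.not_eq_true']
        exact Bool.not_eq_true _ ▸ ht
      rw [if_neg ht, hpr, if_pos rfl]
      rfl
  · rw [if_neg h, if_neg h]
    simp
    omega
termination_by lines.length - k

-- phase 1 = first index satisfying pS (or -1)
theorem pvPhase1_char (lines : List String) (i : Nat) :
    pvPhase1 lines i =
      (match (List.range' i (lines.length - i)).find? (fun j => pS lines j) with
       | none => (-1 : Int)
       | some st => (st : Int)) := by
  rw [pvPhase1, find?_range'_step]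
  by_cases h : i < lines.length
  · rw [if_pos h, if_pos h]
    by_cases hsh : pSheb lines i = true
    · have : pS lines i = false := by simp only [pS, hsh, Bool.not_true, Bool.false_and]
      rw [if_pos hsh, this]
      simp only [Bool.false_eq_true, if_false]
      exact pvPhase1_char lines (i+1)
    · rw [if_neg hsh]
      by_cases hst : pvStartA lines i (PySem.Str.strip (lines.getD i "")) = true
      · have hsh' : pSheb lines i = false := by revert hsh; cases pSheb lines i <;> simp
        have : pS lines i = true := by simp only [pS, hsh', hst, Bool.not_false, Bool.true_and]
        rw [if_pos hst, this, if_pos rfl]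
      · have hst' : pvStartA lines i (PySem.Str.strip (lines.getD i "")) = false := by
          revert hst; cases pvStartA lines i (PySem.Str.strip (lines.getD i "")) <;> simp
        have : pS lines i = false := by simp only [pS, hst', Bool.and_false]
        rw [if_neg hst, this]
        simp only [Bool.false_eq_true, if_false]
        exact pvPhase1_char lines (i+1)
  · rw [if_neg h, if_neg h]
termination_by lines.length - i

-- phase 2 = first index ≥ j satisfying pE, then the extension value (or -1)
theorem pvPhase2_char (lines : List String) (j : Nat) :
    pvPhase2 lines j =
      (match (List.range' j (lines.length - j)).find? (fun k => pE lines k) with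
       | none => (-1 : Int)
       | some em =>
         (((((List.range' (em+1) (lines.length - (em+1))).find? (fun k => pR lines k)).getD lines.length) : Nat) : Int)) := by
  rw [pvPhase2, find?_range'_step]
  by_cases h : j < lines.length
  · rw [if_pos h, if_pos h]
    by_cases hsh : pSheb lines j = true
    · have : pE lines j = false := by simp only [pE, hsh, Bool.not_true, Bool.false_and]
      rw [if_pos hsh, this]
      simp only [Bool.false_eq_true, if_false]
      exact pvPhase2_char lines (j+1)
    · rw [if_neg hsh]
      by_cases hm : PySem.Str.isIn "limitations under the License" (PySem.Str.strip (lines.getD j "")) = true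
      · have hsh' : pSheb lines j = false := by revert hsh; cases pSheb lines j <;> simp
        have : pE lines j = true := by simp only [pE, hsh', hm, Bool.not_false, Bool.true_and]
        rw [if_pos hm, this, if_pos rfl]
        have := pvExtA_char lines (j+1) (by omega)
        rw [show ((j : Int) + 1) = (((j+1 : Nat)) : Int) by push_cast; ring, this]
      · have hm' : PySem.Str.isIn "limitations under the License" (PySem.Str.strip (lines.getD j "")) = false := by
          revert hm; cases PySem.Str.isIn "limitations under the License" (PySem.Str.strip (lines.getD j "")) <;> simp
        have : pE lines j = false := by simp only [pE, hm', Bool.and_false]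
        rw [if_neg hm, this]
        simp only [Bool.false_eq_true, if_false]
        exact pvPhase2_char lines (j+1)
  · rw [if_neg h, if_neg h]
termination_by lines.length - j

-- pointwise evaluation of B's tag vectors at indices < n
theorem getD_map_of_lt {α β : Type} (f : α → β) (l : List α) (i : Nat) (h : i < l.length)
    (d : β) (d' : α) : (l.map f).getD i d = f (l.getD i d') := by
  rw [List.getD_eq_getElem?_getD, List.getD_eq_getElem?_getD, List.getElem?_map,
    List.getElem?_eq_getElem h]
  rfl

theorem getD_range_map {β : Type} (f : Nat → β) (n i : Nat) (h : i < n) (d : β) :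
    ((List.range n).map f).getD i d = f i := by
  rw [getD_map_of_lt f (List.range n) i (by simpa using h) d 0]
  congr 1
  rw [List.getD_eq_getElem?_getD, List.getElem?_range h]
  rfl

-- B's any(...) disjunction equals A's written-out disjunction
theorem anyMark_eq (lines : List String) (i : Nat) (s : String) :
    (pvAnyMark s ||
      (s == "/*" && decide (i + 1 < lines.length) && pvAnyMark (lines.getD (i+1) ""))) =
    pvStartA lines i s := by
  simp [pvAnyMark, pvStartA, List.any, Bool.or_assoc]

-- ===== VERDICT (by name: the statement is the Claim_ definition above) =====
theorem find_existing_license_spec : Claim_equal_find_existing_license := by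
  intro content _
  unfold Spec_find_existing_license find_existing_license find_existing_license_alt
  set lines := (PySem.Str.split? content "\n").getD [] with hl
  simp only []
  rw [pvLoopA_false, pvPhase1_char]
  rw [Nat.sub_zero, ← List.range_eq_range']
  have hstrip : ∀ a, a < lines.length →
      (List.map PySem.Str.strip lines).getD a "" = PySem.Str.strip (lines.getD a "") := by
    intro a ha
    exact getD_map_of_lt _ _ _ (by simpa using ha) _ ""
  have hsheb : ∀ a, a < lines.length →
      (List.map (fun s => PySem.Str.startswith s "#!/") (List.map PySem.Str.strip lines)).getD a false
        = pSheb lines a := by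
    intro a ha
    rw [getD_map_of_lt _ _ _ (by simpa using ha) _ "", hstrip a ha, pSheb]
  have hS : List.find? (fun i =>
        (List.map (fun i =>
          !(List.map (fun s => PySem.Str.startswith s "#!/") (List.map PySem.Str.strip lines)).getD i false &&
            (pvAnyMark ((List.map PySem.Str.strip lines).getD i "") ||
              (List.map PySem.Str.strip lines).getD i "" == "/*" && decide (i + 1 < lines.length) &&
                pvAnyMark (lines.getD (i + 1) ""))) (List.range lines.length)).getD i false)
        (List.range lines.length) = List.find? (fun j => pS lines j) (List.range lines.length) := by
    apply find?_congr_mem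
    intro a ha
    have ha' := List.mem_range.mp ha
    rw [getD_range_map _ _ _ ha', hsheb a ha', hstrip a ha', anyMark_eq, pS]
  rw [hS]
  cases hf : List.find? (fun j => pS lines j) (List.range lines.length) with
  | none => simp
  | some st =>
    have hst : st < lines.length := List.mem_range.mp (List.mem_of_find?_eq_some hf)
    have hne : ¬ ((st : Int) = -1) := by omega
    dsimp only
    rw [if_neg hne, Int.toNat_natCast, pvPhase2_char]
    have hE : List.find? (fun j =>
          (List.map (fun i =>
            !(List.map (fun s => PySem.Str.startswith s "#!/") (List.map PySem.Str.strip lines)).getD i false &&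
              PySem.Str.isIn "limitations under the License" ((List.map PySem.Str.strip lines).getD i ""))
            (List.range lines.length)).getD j false)
          (List.range' st (lines.length - st))
        = List.find? (fun k => pE lines k) (List.range' st (lines.length - st)) := by
      apply find?_congr_mem
      intro a ha
      have ha' : a < lines.length := by
        have := List.mem_range'_1.mp ha
        omega
      rw [getD_range_map _ _ _ ha', hsheb a ha', hstrip a ha', pE]
    rw [hE]
    cases he : List.find? (fun k => pE lines k) (List.range' st (lines.length - st)) with
    | none => rfl
    | some em =>
      have hem : em < lines.length := by
        have := List.mem_range'_1.mp (List.mem_of_find?_eq_some he)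
        omega
      dsimp only
      have hR : List.find? (fun k =>
            (List.map (fun s =>
              !(s == "" ||
                  PySem.Str.startswith s "#" && PySem.Str.strip (PySem.Str.replace s "#" "") == "" ||
                s == "# " || s == "*/" ||
                PySem.Str.startswith s "*" && PySem.Str.strip (PySem.Str.replace s "*" "") == ""))
              (List.map PySem.Str.strip lines)).getD k false)
            (List.range' (em + 1) (lines.length - (em + 1)))
          = List.find? (fun k => pR lines k) (List.range' (em + 1) (lines.length - (em + 1))) := by
        apply find?_congr_mem
        intro a ha
        have ha' : a < lines.length := by
          have := List.mem_range'_1.mp ha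
          omega
        rw [getD_map_of_lt _ _ _ (by simpa using ha') _ "", hstrip a ha', pR, pvTrailerA]
      rw [hR]
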